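-- pv_equiv track=rewrite | github.com/Deltams/GraphGame | task5/desktop_task5_V_1_0.py | valid_replace_and_split
-- ===== SOURCE A (Python) =====
-- def valid_replace_and_split(text):
--     text = text + ' '
--     tmp_text = ""
--     for j in range(len(text)-1):
--         if '0' <= text[j] and text[j] <= '9' and not ('0' <= text[j+1] and text[j+1] <= '9'):
--             tmp_text += text[j] + '_'
--         else:
--             tmp_text += text[j]
--     text = tmp_text
--     text = text.replace('(', '').replace(')', '').replace('[', '').replace(']', '').replace('::', '').replace(' ', '').split(',')
--     return text
-- ===== SOURCE B (Python) =====
-- def valid_replace_and_split(text):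
--     # One pass over the characters: insert '_' after each digit run (lookahead),
--     # drop brackets, merge '::' pairs via a pending flag, skip spaces, split on commas.
--     tokens = []
--     cur = []
--     pending = False  # an unmatched ':' seen, not yet flushed
--     n = len(text)
--     for j, c in enumerate(text):
--         if c == ':':
--             pending = not pending
--             continue
--         if c in '()[]':
--             continue
--         if pending:
--             cur.append(':')
--             pending = False
--         if c == ' ':
--             continue
--         if c == ',':
--             tokens.append(''.join(cur))
--             cur = []
--             continue
--         cur.append(c)
--         if '0' <= c <= '9' and not (j + 1 < n and '0' <= text[j + 1] <= '9'):
--             cur.append('_')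
--     if pending:
--         cur.append(':')
--     tokens.append(''.join(cur))
--     return tokens
-- ===== Notes on version B (the rewrite author's own statement) =====
-- stated objective: alternative
-- what changed: A builds an underscore-inserted copy with a sentinel-space index loop, then runs six whole-string replace passes and a final split; B does everything in one pass over the characters with a pending-colon flag and a running token accumulator, emitting tokens directly.
import Mathlib
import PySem

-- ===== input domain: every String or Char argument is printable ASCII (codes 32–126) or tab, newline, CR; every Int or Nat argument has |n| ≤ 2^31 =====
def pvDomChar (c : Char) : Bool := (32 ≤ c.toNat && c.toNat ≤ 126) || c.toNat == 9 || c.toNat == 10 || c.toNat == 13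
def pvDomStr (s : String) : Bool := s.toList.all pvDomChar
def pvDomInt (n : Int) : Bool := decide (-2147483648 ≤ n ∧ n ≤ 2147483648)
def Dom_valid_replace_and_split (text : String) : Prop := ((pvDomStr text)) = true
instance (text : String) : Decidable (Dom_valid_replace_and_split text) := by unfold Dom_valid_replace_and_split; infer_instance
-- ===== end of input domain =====

-- B replaces A's sentinel-space index loop plus six whole-string replace passes and the final
-- split by a single one-pass fold over the characters (objective: alternative single-pass algorithm).

-- ===== PORT A =====
def valid_replace_and_split (text : String) : List String :=
  -- text = text + ' '
  let ds : List Char := text.toList ++ [' ']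
  -- for j in range(len(text)-1): build tmp_text  (indices j, j+1 are always in range)
  let tmp : List Char :=
    (PySem.List.pyRange 0 ((ds.length : Int) - 1) 1).foldl
      (fun acc j =>
        let cj := PySem.List.pyGetD ds j ' '
        let cj1 := PySem.List.pyGetD ds (j + 1) ' '
        if '0' ≤ cj ∧ cj ≤ '9' ∧ ¬ ('0' ≤ cj1 ∧ cj1 ≤ '9') then
          acc ++ [cj, '_']
        else
          acc ++ [cj]) []
  -- .replace('(','').replace(')','').replace('[','').replace(']','').replace('::','').replace(' ','').split(',')
  let t1 := PySem.Chars.replace tmp ['('] []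
  let t2 := PySem.Chars.replace t1 [')'] []
  let t3 := PySem.Chars.replace t2 ['['] []
  let t4 := PySem.Chars.replace t3 [']'] []
  let t5 := PySem.Chars.replace t4 [':', ':'] []
  let t6 := PySem.Chars.replace t5 [' '] []
  (PySem.Chars.splitOn t6 [',']).map String.mk

-- ===== PORT B =====
-- Source B's lookahead "j + 1 < n and '0' <= text[j+1] <= '9'" on the remaining characters
def nextDigit : List Char → Bool
  | [] => false
  | d :: _ => decide ('0' ≤ d ∧ d ≤ '9')

-- the single loop of Source B: state = (pending ':', current token chars, finished tokens)
def altGo : List Char → Bool → List Char → List String → List String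
  | [], pending, cur, tokens =>
      tokens ++ [String.mk (if pending then cur ++ [':'] else cur)]
  | c :: rest, pending, cur, tokens =>
      if c = ':' then altGo rest (!pending) cur tokens
      else if c = '(' ∨ c = ')' ∨ c = '[' ∨ c = ']' then altGo rest pending cur tokens
      else
        let cur' := if pending then cur ++ [':'] else cur
        if c = ' ' then altGo rest false cur' tokens
        else if c = ',' then altGo rest false [] (tokens ++ [String.mk cur'])
        else
          altGo rest false
            (if ('0' ≤ c ∧ c ≤ '9') ∧ nextDigit rest = false
             then cur' ++ [c, '_'] else cur' ++ [c]) tokens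

def valid_replace_and_split_alt (text : String) : List String :=
  altGo text.toList false [] []

-- ===== PRECONDITION & SPEC =====
def Spec_valid_replace_and_split (text : String) (out : List String) : Prop := out = valid_replace_and_split_alt text
instance (text : String) (out : List String) : Decidable (Spec_valid_replace_and_split text out) := by unfold Spec_valid_replace_and_split; infer_instance

-- ===== CLAIM (what is proved, stated in full; the proofs are below) =====
def Claim_equal_valid_replace_and_split : Prop := ∀ (text : String), Dom_valid_replace_and_split text → Spec_valid_replace_and_split text (valid_replace_and_split text)

-- ===== LEMMAS AND PROOFS =====

def under : List Char → List Char
  | [] => []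
  | c :: r =>
      if ('0' ≤ c ∧ c ≤ '9') ∧ nextDigit r = false then c :: '_' :: under r
      else c :: under r

def prF : List Char → List Char
  | [] => []
  | [c] => [c]
  | c :: d :: r => if c = ':' ∧ d = ':' then prF r else c :: prF (d :: r)

def splitC : List Char → List (List Char)
  | [] => [[]]
  | c :: r =>
      if c = ',' then [] :: splitC r
      else match splitC r with
           | [] => [[c]]
           | t :: ts => (c :: t) :: ts

def cp (pending : Bool) : List Char := if pending then [':'] else []

def isBr (c : Char) : Bool := c = '(' ∨ c = ')' ∨ c = '[' ∨ c = ']'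

def S (pending : Bool) (cs : List Char) : List Char :=
  (prF (cp pending ++ (under cs).filter (fun c => !isBr c))).filter (fun c => c ≠ ' ')

theorem go_single (b : Char) : ∀ (fuel : Nat) (l acc : List Char), l.length ≤ fuel →
    PySem.Chars.replace.go [b] [] fuel l acc = acc.reverse ++ l.filter (fun c => c ≠ b) := by
  intro fuel
  induction fuel with
  | zero =>
    intro l acc h
    have : l = [] := List.eq_nil_of_length_eq_zero (Nat.le_zero.mp h)
    subst this; simp [PySem.Chars.replace.go]
  | succ n ih =>
    intro l acc h
    cases l with
    | nil => simp [PySem.Chars.replace.go]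
    | cons c t =>
      have ht : t.length ≤ n := by simpa using h
      by_cases hb : c = b
      · subst hb
        simp [PySem.Chars.replace.go, List.isPrefixOf, ih t acc ht]
      · simp [PySem.Chars.replace.go, List.isPrefixOf, Ne.symm hb, ih t (c :: acc) ht, hb]


theorem go_colon2 : ∀ (fuel : Nat) (l acc : List Char), l.length ≤ fuel →
    PySem.Chars.replace.go [':', ':'] [] fuel l acc = acc.reverse ++ prF l := by
  intro fuel
  induction fuel with
  | zero =>
    intro l acc h
    have : l = [] := List.eq_nil_of_length_eq_zero (Nat.le_zero.mp h)
    subst this; simp [PySem.Chars.replace.go, prF]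
  | succ n ih =>
    intro l acc h
    match l with
    | [] => simp [PySem.Chars.replace.go, prF]
    | [c] =>
      have h0 := ih [] (c :: acc) (Nat.zero_le n)
      simp [prF] at h0
      simp [PySem.Chars.replace.go, List.isPrefixOf, prF, h0]
    | c :: d :: r =>
      by_cases hc : c = ':' ∧ d = ':'
      · obtain ⟨hc1, hc2⟩ := hc; subst hc1; subst hc2
        have hr : r.length ≤ n := by simp at h; omega
        simp [PySem.Chars.replace.go, List.isPrefixOf, prF, ih r acc hr]
      · have hp : ([':', ':'].isPrefixOf (c :: d :: r)) = false := by
          simp [List.isPrefixOf]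
          intro h1 h2; exact hc ⟨h1.symm, h2.symm⟩
        have hr : (d :: r).length ≤ n := by simp at h ⊢; omega
        rw [PySem.Chars.replace.go]
        simp only [hp, Bool.false_eq_true, if_false, ih (d :: r) (c :: acc) hr]
        rw [prF, if_neg hc]
        simp

theorem loopA (text : List Char) :
    ∀ (suf pre acc : List Char), text = pre ++ suf →
    (PySem.List.pyRange (pre.length : Int) ((text.length : Int)) 1).foldl
      (fun acc j =>
        let cj := PySem.List.pyGetD (text ++ [' ']) j ' '
        let cj1 := PySem.List.pyGetD (text ++ [' ']) (j + 1) ' '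
        if '0' ≤ cj ∧ cj ≤ '9' ∧ ¬ ('0' ≤ cj1 ∧ cj1 ≤ '9') then
          acc ++ [cj, '_']
        else
          acc ++ [cj]) acc = acc ++ under suf := by
  intro suf
  induction suf with
  | nil =>
    intro pre acc h
    rw [PySem.List.pyRange_one_eq_nil (by simp [h])]
    simp [under]
  | cons c r ih =>
    intro pre acc h
    have hlt : (pre.length : Int) < text.length := by simp [h]
    rw [PySem.List.pyRange_one_cons hlt, List.foldl_cons]
    have hget : PySem.List.pyGetD (text ++ [' ']) (pre.length : Int) ' ' = c := by
      rw [PySem.List.pyGetD_natCast]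
      simp [h, List.getD]
    have hdig1 : ('0' ≤ PySem.List.pyGetD (text ++ [' ']) ((pre.length : Int) + 1) ' '
        ∧ PySem.List.pyGetD (text ++ [' ']) ((pre.length : Int) + 1) ' ' ≤ '9')
        ↔ nextDigit r = true := by
      have harith : (pre.length : Int) + 1 = (((pre ++ [c]).length : Nat) : Int) := by simp
      rw [harith, PySem.List.pyGetD_natCast]
      cases r with
      | nil =>
        have : (text ++ [' ']).getD (pre ++ [c]).length ' ' = ' ' := by
          simp [h, List.getD]
        rw [this]; simp [nextDigit]
      | cons d t =>
        have : (text ++ [' ']).getD (pre ++ [c]).length ' ' = d := by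
          have h2 : text ++ [' '] = (pre ++ [c]) ++ (d :: (t ++ [' '])) := by simp [h]
          rw [h2]
          simp [List.getD]
        rw [this]; simp [nextDigit]
    have harith : (pre.length : Int) + 1 = (((pre ++ [c]).length : Nat) : Int) := by simp
    simp only [hget]
    rw [harith]
    set X := PySem.List.pyGetD (text ++ [' ']) (((pre ++ [c]).length : Nat) : Int) ' ' with hX
    have hcond' : (('0' ≤ c ∧ c ≤ '9') ∧ nextDigit r = false) ↔ ('0' ≤ c ∧ c ≤ '9' ∧ ¬ ('0' ≤ X ∧ X ≤ '9')) := by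
      rw [hX, ← harith]
      constructor
      · rintro ⟨h1, h2⟩
        exact ⟨h1.1, h1.2, fun hx => by rw [hdig1.mp hx] at h2; simp at h2⟩
      · rintro ⟨h1, h2, h3⟩
        refine ⟨⟨h1, h2⟩, ?_⟩
        cases hnn : nextDigit r with
        | false => rfl
        | true => exact absurd (hdig1.mpr hnn) h3
    by_cases hcond : '0' ≤ c ∧ c ≤ '9' ∧ ¬ ('0' ≤ X ∧ X ≤ '9')
    · rw [if_pos hcond, ih (pre ++ [c]) (acc ++ [c, '_']) (by simp [h]),
        under, if_pos (hcond'.mpr hcond)]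
      simp
    · rw [if_neg hcond, ih (pre ++ [c]) (acc ++ [c]) (by simp [h]),
        under, if_neg (fun hh => hcond (hcond'.mp hh))]
      simp

theorem splitC_ne_nil (l : List Char) : splitC l ≠ [] := by
  match l with
  | [] => simp [splitC]
  | c :: r =>
    rw [splitC]
    split
    · simp
    · split <;> simp

theorem splitC_append (pre : List Char) : ∀ xs : List Char, ',' ∉ pre →
    splitC (pre ++ xs) =
      match splitC xs with
      | [] => [pre]
      | t :: ts => (pre ++ t) :: ts := by
  induction pre with
  | nil =>
    intro xs _
    rcases hs : splitC xs with _ | ⟨t, ts⟩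
    · exact absurd hs (splitC_ne_nil xs)
    · simpa using hs
  | cons p pre ih =>
    intro xs h
    have hp : p ≠ ',' := fun hh => h (by simp [hh])
    have h' : ',' ∉ pre := fun hh => h (by simp [hh])
    rw [List.cons_append, splitC, if_neg hp, ih xs h']
    rcases hs : splitC xs with _ | ⟨t, ts⟩
    · exact absurd hs (splitC_ne_nil xs)
    · simp

theorem prF_cons_ne (c : Char) (hc : c ≠ ':') (xs : List Char) :
    prF (c :: xs) = c :: prF xs := by
  cases xs with
  | nil => simp [prF]
  | cons d r => rw [prF, if_neg (fun hh => hc hh.1)]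

theorem prF_cp_cons (pending : Bool) (c : Char) (hc : c ≠ ':') (X : List Char) :
    prF (cp pending ++ c :: X) = cp pending ++ c :: prF X := by
  cases pending with
  | false => simp [cp, prF_cons_ne c hc]
  | true =>
    rw [show cp true ++ c :: X = ':' :: c :: X by simp [cp], prF,
      if_neg (fun hh => hc hh.2), prF_cons_ne c hc]
    simp [cp]

-- S step lemmas
theorem S_nil (pending : Bool) : S pending [] = cp pending := by
  cases pending <;> simp [S, under, cp, prF] <;> decide

theorem S_colon (pending : Bool) (rest : List Char) :
    S pending (':' :: rest) = S (!pending) rest := by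
  have hu : under (':' :: rest) = ':' :: under rest := by
    rw [under, if_neg (by rintro ⟨⟨_, h2⟩, _⟩; exact absurd h2 (by decide))]
  cases pending with
  | false => simp [S, hu, cp, isBr]
  | true =>
    rw [S, hu]
    rw [show ((':' :: under rest).filter (fun c => !isBr c)) = ':' :: (under rest).filter (fun c => !isBr c) by simp [isBr]]
    rw [show cp true ++ ':' :: (under rest).filter (fun c => !isBr c) = ':' :: ':' :: (under rest).filter (fun c => !isBr c) by simp [cp]]
    rw [prF]
    simp [S, cp]

theorem S_br (pending : Bool) (c : Char) (hc : isBr c = true) (hd : ¬ ('0' ≤ c ∧ c ≤ '9'))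
    (rest : List Char) : S pending (c :: rest) = S pending rest := by
  rw [S, under, if_neg (fun hh => hd hh.1)]
  simp [S, hc]

theorem S_other (pending : Bool) (c : Char) (hc : c ≠ ':') (hb : isBr c = false)
    (rest : List Char) :
    S pending (c :: rest) =
      cp pending ++ ((if ('0' ≤ c ∧ c ≤ '9') ∧ nextDigit rest = false
        then [c, '_'] else [c]).filter (fun x => x ≠ ' ')) ++ S false rest := by
  rw [S, under]
  by_cases hd : ('0' ≤ c ∧ c ≤ '9') ∧ nextDigit rest = false
  · rw [if_pos hd, if_pos hd]
    have hbu : isBr '_' = false := by decide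
    rw [show ((c :: '_' :: under rest).filter (fun x => !isBr x))
        = c :: '_' :: (under rest).filter (fun x => !isBr x) by simp [hb, hbu]]
    rw [prF_cp_cons pending c hc, prF_cons_ne '_' (by decide)]
    have hcsp : c ≠ ' ' := by rintro rfl; exact absurd hd.1 (by decide)
    cases pending <;> simp [cp, S, hcsp] <;> decide
  · rw [if_neg hd, if_neg hd]
    rw [show ((c :: under rest).filter (fun x => !isBr x))
        = c :: (under rest).filter (fun x => !isBr x) by simp [hb]]
    rw [prF_cp_cons pending c hc]
    by_cases hcsp : c = ' '
    · subst hcsp; cases pending <;> simp [cp, S]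
    · cases pending <;> simp [cp, S, hcsp]

theorem altGo_inv : ∀ (cs : List Char) (pending : Bool) (cur : List Char) (tokens : List String),
    ',' ∉ cur →
    altGo cs pending cur tokens =
      tokens ++ (splitC (cur ++ S pending cs)).map String.mk := by
  intro cs
  induction cs with
  | nil =>
    intro pending cur tokens h
    rw [altGo, S_nil, splitC_append cur (cp pending) h]
    cases pending <;> simp [cp, splitC]
  | cons c rest ih =>
    intro pending cur tokens h
    by_cases hc : c = ':'
    · subst hc
      rw [altGo, if_pos rfl, ih (!pending) cur tokens h, S_colon]
    · by_cases hb : c = '(' ∨ c = ')' ∨ c = '[' ∨ c = ']'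
      · have hbr : isBr c = true := by simp [isBr, hb]
        have hd : ¬ ('0' ≤ c ∧ c ≤ '9') := by
          rcases hb with rfl | rfl | rfl | rfl <;> decide
        rw [altGo, if_neg hc, if_pos hb, ih pending cur tokens h,
          S_br pending c hbr hd rest]
      · have hbr : isBr c = false := by simp [isBr, hb]
        have hcur' : ',' ∉ (if pending then cur ++ [':'] else cur) := by
          cases pending <;> simp [h]
        by_cases hs : c = ' '
        · subst hs
          rw [altGo, if_neg hc, if_neg hb]
          simp only [if_pos rfl, if_true]
          rw [ih false _ tokens hcur', S_other pending ' ' hc hbr rest]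
          have : ¬ (('0' ≤ ' ' ∧ ' ' ≤ '9') ∧ nextDigit rest = false) := by
            rintro ⟨⟨h1, h2⟩, _⟩; exact absurd h1 (by decide)
          rw [if_neg this]
          cases pending <;> simp [cp]
        · by_cases hcm : c = ','
          · subst hcm
            rw [altGo, if_neg hc, if_neg hb]
            simp only [if_neg hs, if_pos rfl, if_true]
            rw [ih false [] _ (by simp), S_other pending ',' hc hbr rest]
            have : ¬ (('0' ≤ ',' ∧ ',' ≤ '9') ∧ nextDigit rest = false) := by
              rintro ⟨⟨h1, h2⟩, _⟩; exact absurd h1 (by decide)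
            rw [if_neg this]
            have hnc : ',' ∉ cur ++ cp pending := by
              cases pending <;> simp [cp, h] <;> exact fun hh => h hh
            rw [show cur ++ ((cp pending) ++ ([','].filter (fun x => x ≠ ' ')) ++ S false rest)
                = (cur ++ cp pending) ++ (',' :: S false rest) by simp]
            rw [splitC_append (cur ++ cp pending) (',' :: S false rest) hnc]
            rw [show splitC (',' :: S false rest) = [] :: splitC (S false rest) by
              rw [splitC, if_pos rfl]]
            cases pending <;> simp [cp]
          · rw [altGo, if_neg hc, if_neg hb]
            simp only [if_neg hs, if_neg hcm]
            have hnewc : ',' ∉ (if ('0' ≤ c ∧ c ≤ '9') ∧ nextDigit rest = false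
                then (if pending then cur ++ [':'] else cur) ++ [c, '_']
                else (if pending then cur ++ [':'] else cur) ++ [c]) := by
              have h_ : ('_' : Char) ≠ ',' := by decide
              split <;> simp [hcur', Ne.symm hcm, hcur'] <;>
               first
                | (exact fun hh => absurd hh.symm hcm)
                | (intro hh; rcases hh with hh | hh
                   · exact hcur' hh
                   · rcases hh with hh | hh
                     · exact absurd hh.symm hcm
                     · exact absurd hh.symm h_)
            rw [ih false _ tokens hnewc, S_other pending c hc hbr rest]
            by_cases hd : ('0' ≤ c ∧ c ≤ '9') ∧ nextDigit rest = false
            · rw [if_pos hd, if_pos hd]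
              have h1 : c ≠ ' ' := hs
              have h2 : ('_' : Char) ≠ ' ' := by decide
              cases pending <;> simp [cp, h1, h2]
            · rw [if_neg hd, if_neg hd]
              cases pending <;> simp [cp, hs]

theorem splitOn_go : ∀ (fuel : Nat) (l cur : List Char) (acc : List (List Char)), l.length ≤ fuel →
    PySem.Chars.splitOn.go [','] fuel l cur acc = acc.reverse ++
      (match splitC l with
       | [] => [cur.reverse]
       | t :: ts => (cur.reverse ++ t) :: ts) := by
  intro fuel
  induction fuel with
  | zero =>
    intro l cur acc h
    have : l = [] := List.eq_nil_of_length_eq_zero (Nat.le_zero.mp h)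
    subst this; simp [PySem.Chars.splitOn.go, splitC]
  | succ n ih =>
    intro l cur acc h
    match l with
    | [] => simp [PySem.Chars.splitOn.go, splitC]
    | c :: r =>
      have hr : r.length ≤ n := by simpa using h
      by_cases hc : c = ','
      · subst hc
        rw [PySem.Chars.splitOn.go]
        simp only [List.isPrefixOf, BEq.rfl, Bool.and_true, List.isPrefixOf_nil_left,
          if_pos, List.length_cons, List.length_nil, Nat.zero_add, List.drop_succ_cons, List.drop_zero]
        rw [ih r [] (cur.reverse :: acc) hr, splitC, if_pos rfl]
        rcases hs : splitC r with _ | ⟨t, ts⟩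
        · exact absurd hs (splitC_ne_nil r)
        · simp
      · have hp : ([','].isPrefixOf (c :: r)) = false := by
          simp [List.isPrefixOf]; exact fun hh => (hc hh.symm).elim
        rw [PySem.Chars.splitOn.go]
        simp only [hp, Bool.false_eq_true, if_false]
        rw [ih r (c :: cur) acc hr, splitC, if_neg hc]
        rcases hs : splitC r with _ | ⟨t, ts⟩
        · exact absurd hs (splitC_ne_nil r)
        · simp

theorem replace_single (xs : List Char) (b : Char) :
    PySem.Chars.replace xs [b] [] = xs.filter (fun c => c ≠ b) := by
  simp [PySem.Chars.replace, go_single b xs.length xs [] le_rfl]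

theorem replace_colon2 (xs : List Char) :
    PySem.Chars.replace xs [':', ':'] [] = prF xs := by
  simp [PySem.Chars.replace, go_colon2 xs.length xs [] le_rfl]

theorem splitOn_comma (xs : List Char) :
    PySem.Chars.splitOn xs [','] = splitC xs := by
  rw [PySem.Chars.splitOn, splitOn_go (xs.length + 1) xs [] [] (by omega)]
  rcases hs : splitC xs with _ | ⟨t, ts⟩
  · exact absurd hs (splitC_ne_nil xs)
  · simp

theorem filter4 (l : List Char) :
    ((((l.filter (fun c => c ≠ '(')).filter (fun c => c ≠ ')')).filter
        (fun c => c ≠ '[')).filter (fun c => c ≠ ']')) = l.filter (fun c => !isBr c) := by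
  induction l with
  | nil => rfl
  | cons c t ih =>
    by_cases h1 : c = '(' <;> by_cases h2 : c = ')' <;> by_cases h3 : c = '[' <;>
      by_cases h4 : c = ']' <;> simp_all [List.filter_cons, isBr]

-- ===== VERDICT (by name: the statement is the Claim_ definition above) =====
theorem valid_replace_and_split_spec : Claim_equal_valid_replace_and_split := by
  unfold Claim_equal_valid_replace_and_split Spec_valid_replace_and_split
  intro text _
  unfold valid_replace_and_split valid_replace_and_split_alt
  simp only []
  rw [show (((text.toList ++ [' ']).length : Int) - 1) = ((text.toList.length : Nat) : Int) by
    push_cast; simp]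
  rw [show (0 : Int) = ((([] : List Char).length : Nat) : Int) by simp]
  rw [loopA text.toList text.toList [] [] (by simp)]
  rw [replace_single, replace_single, replace_single, replace_single,
    replace_colon2, replace_single, splitOn_comma, filter4]
  rw [altGo_inv text.toList false [] [] (by simp)]
  simp [S, cp, under]
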